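-- pv_equiv track=rewrite | github.com/mortyc126-debug/SHA | nk_biased_birthday.py | carry_profile
-- ===== SOURCE A (Python) =====
-- MASK32 = 0xFFFFFFFF
--
-- K = [0x428a2f98,0x71374491,0xb5c0fbcf,0xe9b5dba5,0x3956c25b,0x59f111f1,0x923f82a4,0xab1c5ed5,0xd807aa98,0x12835b01,0x243185be,0x550c7dc3,0x72be5d74,0x80deb1fe,0x9bdc06a7,0xc19bf174,0xe49b69c1,0xefbe4786,0x0fc19dc6,0x240ca1cc,0x2de92c6f,0x4a7484aa,0x5cb0a9dc,0x76f988da,0x983e5152,0xa831c66d,0xb00327c8,0xbf597fc7,0xc6e00bf3,0xd5a79147,0x06ca6351,0x14292967,0x27b70a85,0x2e1b2138,0x4d2c6dfc,0x53380d13,0x650a7354,0x766a0abb,0x81c2c92e,0x92722c85,0xa2bfe8a1,0xa81a664b,0xc24b8b70,0xc76c51a3,0xd192e819,0xd6990624,0xf40e3585,0x106aa070,0x19a4c116,0x1e376c08,0x2748774c,0x34b0bcb5,0x391c0cb3,0x4ed8aa4a,0x5b9cca4f,0x682e6ff3,0x748f82ee,0x78a5636f,0x84c87814,0x8cc70208,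0x90befffa,0xa4506ceb,0xbef9a3f7,0xc67178f2]
--
-- IV = [0x6a09e667,0xbb67ae85,0x3c6ef372,0xa54ff53a,0x510e527f,0x9b05688c,0x1f83d9ab,0x5be0cd19]
--
-- def rotr(x,n): return ((x>>n)|(x<<(32-n)))&MASK32
--
-- def sig0(x): return rotr(x,2)^rotr(x,13)^rotr(x,22)
--
-- def sig1(x): return rotr(x,6)^rotr(x,11)^rotr(x,25)
--
-- def ssig0(x): return rotr(x,7)^rotr(x,18)^(x>>3)
--
-- def ssig1(x): return rotr(x,17)^rotr(x,19)^(x>>10)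
--
-- def ch(e,f,g): return (e&f)^(~e&g)&MASK32
--
-- def maj(a,b,c): return (a&b)^(a&c)^(b&c)
--
-- def carry_profile(M, R=64):
--     """Return 64-bit vector of carry-outs per round (e-computation only)."""
--     W = list(M)+[0]*(64-len(M))
--     for i in range(16,64): W[i]=(ssig1(W[i-2])+W[i-7]+ssig0(W[i-15])+W[i-16])&MASK32
--     a,b,c,d,e,f,g,h = IV
--     profile = 0
--     for r in range(R):
--         T1=(h+sig1(e)+ch(e,f,g)+K[r]+W[r])&MASK32
--         T2=(sig0(a)+maj(a,b,c))&MASK32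
--         if (d + T1) > MASK32:
--             profile |= (1 << r)
--         h,g,f=g,f,e; e=(d+T1)&MASK32; d,c,b=c,b,a; a=(T1+T2)&MASK32
--     return profile
-- ===== SOURCE B (Python) =====
-- MASK32 = 0xFFFFFFFF
--
-- K = [0x428a2f98,0x71374491,0xb5c0fbcf,0xe9b5dba5,0x3956c25b,0x59f111f1,0x923f82a4,0xab1c5ed5,0xd807aa98,0x12835b01,0x243185be,0x550c7dc3,0x72be5d74,0x80deb1fe,0x9bdc06a7,0xc19bf174,0xe49b69c1,0xefbe4786,0x0fc19dc6,0x240ca1cc,0x2de92c6f,0x4a7484aa,0x5cb0a9dc,0x76f988da,0x983e5152,0xa831c66d,0xb00327c8,0xbf597fc7,0xc6e00bf3,0xd5a79147,0x06ca6351,0x14292967,0x27b70a85,0x2e1b2138,0x4d2c6dfc,0x53380d13,0x650a7354,0x766a0abb,0x81c2c92e,0x92722c85,0xa2bfe8a1,0xa81a664b,0xc24b8b70,0xc76c51a3,0xd192e819,0xd6990624,0xf40e3585,0x106aa070,0x19a4c116,0x1e376c08,0x2748774c,0x34b0bcb5,0x391c0cb3,0x4ed8aa4a,0x5b9cca4f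,0x682e6ff3,0x748f82ee,0x78a5636f,0x84c87814,0x8cc70208,0x90befffa,0xa4506ceb,0xbef9a3f7,0xc67178f2]
--
-- IV = [0x6a09e667,0xbb67ae85,0x3c6ef372,0xa54ff53a,0x510e527f,0x9b05688c,0x1f83d9ab,0x5be0cd19]
--
-- def rotr(x,n): return ((x>>n)|(x<<(32-n)))&MASK32
--
-- def sig0(x): return rotr(x,2)^rotr(x,13)^rotr(x,22)
--
-- def sig1(x): return rotr(x,6)^rotr(x,11)^rotr(x,25)
--
-- def ssig0(x): return rotr(x,7)^rotr(x,18)^(x>>3)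
--
-- def ssig1(x): return rotr(x,17)^rotr(x,19)^(x>>10)
--
-- def ch(e,f,g): return (e&f)^(~e&g)&MASK32
--
-- def maj(a,b,c): return (a&b)^(a&c)^(b&c)
--
-- def carry_profile(M, R=64):
--     """Fused single pass: the message schedule is produced on the fly in a
--     16-word sliding window instead of precomputing all 64 words."""
--     win = (list(M) + [0]*16)[:16]
--     a,b,c,d,e,f,g,h = IV
--     profile = 0
--     for r in range(R):
--         if r < 16:
--             w = win[r]
--         else:
--             w = (ssig1(win[14]) + win[9] + ssig0(win[1]) + win[0]) & MASK32
--             win = win[1:] + [w]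
--         T1 = (h + sig1(e) + ch(e,f,g) + K[r] + w) & MASK32
--         T2 = (sig0(a) + maj(a,b,c)) & MASK32
--         if d + T1 > MASK32:
--             profile |= 1 << r
--         h,g,f = g,f,e; e = (d+T1) & MASK32; d,c,b = c,b,a; a = (T1+T2) & MASK32
--     return profile
-- ===== Notes on version B (the rewrite author's own statement) =====
-- stated objective: alternative
-- what changed: Fused the two passes: instead of precomputing the full 64-word message schedule and then looping over rounds, B runs a single round loop that derives each schedule word on the fly from a 16-word sliding window, so only O(16) schedule state is kept.
import Mathlib
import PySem

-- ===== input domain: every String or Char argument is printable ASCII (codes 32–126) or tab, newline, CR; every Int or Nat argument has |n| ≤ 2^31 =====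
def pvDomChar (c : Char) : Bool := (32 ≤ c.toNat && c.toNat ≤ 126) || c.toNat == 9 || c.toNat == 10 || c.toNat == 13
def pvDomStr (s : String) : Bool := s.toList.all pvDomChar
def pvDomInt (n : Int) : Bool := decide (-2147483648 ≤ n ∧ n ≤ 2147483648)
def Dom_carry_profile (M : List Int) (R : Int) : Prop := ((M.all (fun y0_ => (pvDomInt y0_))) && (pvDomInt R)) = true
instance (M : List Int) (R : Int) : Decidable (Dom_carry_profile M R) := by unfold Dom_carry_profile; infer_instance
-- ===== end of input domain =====

-- B fuses A's two loops (precompute 64 schedule words, then run rounds) into one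
-- round loop that derives each schedule word on the fly in a 16-word sliding window.

-- ===== PORT A =====
def pvMASK32 : Int := 0xFFFFFFFF

def pvK : List Int := [0x428a2f98,0x71374491,0xb5c0fbcf,0xe9b5dba5,0x3956c25b,0x59f111f1,0x923f82a4,0xab1c5ed5,0xd807aa98,0x12835b01,0x243185be,0x550c7dc3,0x72be5d74,0x80deb1fe,0x9bdc06a7,0xc19bf174,0xe49b69c1,0xefbe4786,0x0fc19dc6,0x240ca1cc,0x2de92c6f,0x4a7484aa,0x5cb0a9dc,0x76f988da,0x983e5152,0xa831c66d,0xb00327c8,0xbf597fc7,0xc6e00bf3,0xd5a79147,0x06ca6351,0x14292967,0x27b70a85,0x2e1b2138,0x4d2c6dfc,0x53380d13,0x650a7354,0x766a0abb,0x81c2c92e,0x92722c85,0xa2bfe8a1,0xa81a664b,0xc24b8b70,0xc76c51a3,0xd192e819,0xd6990624,0xf40e3585,0x106aa070,0x19a4c116,0x1e376c08,0x2748774c,0x34b0bcb5,0x391c0cb3,0x4ed8aa4a,0x5b9cca4f,0x682e6ff3,0x748f82ee,0x78a5636f,0x84c87814,0x8cc70208,0x90befffa,0xa4506ceb,0xb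ef9a3f7,0xc67178f2]

-- rotr is only ever called with a literal 2 ≤ n ≤ 25, so a Nat shift amount is exact
def pvRotr (x : Int) (n : Nat) : Int :=
  PySem.Int.band (PySem.Int.bor (x >>> n) (x <<< (32 - n))) pvMASK32

def pvSig0 (x : Int) : Int := PySem.Int.bxor (PySem.Int.bxor (pvRotr x 2) (pvRotr x 13)) (pvRotr x 22)
def pvSig1 (x : Int) : Int := PySem.Int.bxor (PySem.Int.bxor (pvRotr x 6) (pvRotr x 11)) (pvRotr x 25)
def pvSsig0 (x : Int) : Int := PySem.Int.bxor (PySem.Int.bxor (pvRotr x 7) (pvRotr x 18)) (x >>> 3)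
def pvSsig1 (x : Int) : Int := PySem.Int.bxor (PySem.Int.bxor (pvRotr x 17) (pvRotr x 19)) (x >>> 10)
-- Python precedence: (e&f) ^ (((~e)&g) & MASK32)
def pvCh (e f g : Int) : Int :=
  PySem.Int.bxor (PySem.Int.band e f) (PySem.Int.band (PySem.Int.band (Int.not e) g) pvMASK32)
def pvMaj (a b c : Int) : Int :=
  PySem.Int.bxor (PySem.Int.bxor (PySem.Int.band a b) (PySem.Int.band a c)) (PySem.Int.band b c)

-- one iteration of A's schedule loop: W[i] = (ssig1(W[i-2])+W[i-7]+ssig0(W[i-15])+W[i-16])&MASK32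
-- (i runs over range(16,64), all indices in range, so the total pyGetD/pySetD forms are exact)
def pvSchedStep (W : List Int) (i : Int) : List Int :=
  PySem.List.pySetD W i
    (PySem.Int.band (pvSsig1 (PySem.List.pyGetD W (i-2) 0) + PySem.List.pyGetD W (i-7) 0 +
      pvSsig0 (PySem.List.pyGetD W (i-15) 0) + PySem.List.pyGetD W (i-16) 0) pvMASK32)

-- one iteration of A's round loop; state (a,b,c,d,e,f,g,h,profile).
-- K[r]/W[r] raise for r ≥ 64 in Python; Pre_ (R ≤ 64) keeps r < 64, where pyGetD is exact.
def pvRoundA (W : List Int) (st : Int × Int × Int × Int × Int × Int × Int × Int × Int) (r : Int) :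
    Int × Int × Int × Int × Int × Int × Int × Int × Int :=
  match st with
  | (a, b, c, d, e, f, g, h, profile) =>
    let T1 := PySem.Int.band (h + pvSig1 e + pvCh e f g + PySem.List.pyGetD pvK r 0 +
      PySem.List.pyGetD W r 0) pvMASK32
    let T2 := PySem.Int.band (pvSig0 a + pvMaj a b c) pvMASK32
    let profile := if pvMASK32 < d + T1 then PySem.Int.bor profile ((1 : Int) <<< r.toNat) else profile
    (PySem.Int.band (T1 + T2) pvMASK32, a, b, c, PySem.Int.band (d + T1) pvMASK32, e, f, g, profile)

def carry_profile (M : List Int) (R : Int) : Int :=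
  let W0 := M ++ List.replicate (64 - M.length) 0   -- list(M)+[0]*(64-len(M)); Nat '-' truncates like [0]*neg = []
  let W := (PySem.List.pyRange 16 64 1).foldl pvSchedStep W0
  let st := (PySem.List.pyRange 0 R 1).foldl (pvRoundA W)
    (0x6a09e667, 0xbb67ae85, 0x3c6ef372, 0xa54ff53a, 0x510e527f, 0x9b05688c, 0x1f83d9ab, 0x5be0cd19, 0)
  st.2.2.2.2.2.2.2.2

-- ===== PORT B =====
-- one iteration of B's fused loop; state (win, a,b,c,d,e,f,g,h, profile)
def pvRoundB (st : List Int × Int × Int × Int × Int × Int × Int × Int × Int × Int) (r : Int) :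
    List Int × Int × Int × Int × Int × Int × Int × Int × Int × Int :=
  match st with
  | (win, a, b, c, d, e, f, g, h, profile) =>
    let ww : List Int × Int :=
      if r < 16 then (win, PySem.List.pyGetD win r 0)
      else
        let w := PySem.Int.band (pvSsig1 (PySem.List.pyGetD win 14 0) + PySem.List.pyGetD win 9 0 +
          pvSsig0 (PySem.List.pyGetD win 1 0) + PySem.List.pyGetD win 0 0) pvMASK32
        (PySem.List.slice win (some 1) none ++ [w], w)   -- win[1:] + [w]
    let win := ww.1
    let w := ww.2
    let T1 := PySem.Int.band (h + pvSig1 e + pvCh e f g + PySem.List.pyGetD pvK r 0 + w) pvMASK32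
    let T2 := PySem.Int.band (pvSig0 a + pvMaj a b c) pvMASK32
    let profile := if pvMASK32 < d + T1 then PySem.Int.bor profile ((1 : Int) <<< r.toNat) else profile
    (win, PySem.Int.band (T1 + T2) pvMASK32, a, b, c, PySem.Int.band (d + T1) pvMASK32, e, f, g, profile)

def carry_profile_alt (M : List Int) (R : Int) : Int :=
  let win := PySem.List.slice (M ++ List.replicate 16 0) none (some 16)   -- (list(M)+[0]*16)[:16]
  let st := (PySem.List.pyRange 0 R 1).foldl pvRoundB
    (win, 0x6a09e667, 0xbb67ae85, 0x3c6ef372, 0xa54ff53a, 0x510e527f, 0x9b05688c, 0x1f83d9ab, 0x5be0cd19, 0)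
  st.2.2.2.2.2.2.2.2.2

-- ===== PRECONDITION & SPEC =====
-- Pre_ excludes exactly R > 64, where Python A raises IndexError at K[r] (round 64); A returns on every R ≤ 64.
def Pre_carry_profile (M : List Int) (R : Int) : Prop := R ≤ 64
instance (M : List Int) (R : Int) : Decidable (Pre_carry_profile M R) := by unfold Pre_carry_profile; infer_instance

def pvWitness_carry_profile : List Int × Int := ([1, 2, 3], 20)

def Spec_carry_profile (M : List Int) (R : Int) (out : Int) : Prop := out = carry_profile_alt M R
instance (M : List Int) (R : Int) (out : Int) : Decidable (Spec_carry_profile M R out) := by unfold Spec_carry_profile; infer_instance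

-- ===== CLAIM (what is proved, stated in full; the proofs are below) =====
def Claim_equal_carry_profile : Prop := ∀ (M : List Int) (R : Int), Dom_carry_profile M R → Pre_carry_profile M R → Spec_carry_profile M R (carry_profile M R)

-- ===== LEMMAS AND PROOFS =====

def pvW0 (M : List Int) : List Int := M ++ List.replicate (64 - M.length) 0
def pvWspec (M : List Int) : Nat → Int
  | i =>
    if _h : i < 16 then (pvW0 M).getD i 0
    else PySem.Int.band (pvSsig1 (pvWspec M (i - 2)) + pvWspec M (i - 7) +
      pvSsig0 (pvWspec M (i - 15)) + pvWspec M (i - 16)) pvMASK32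
  termination_by i => i
  decreasing_by all_goals omega

theorem pvW0_length (M : List Int) : 64 ≤ (pvW0 M).length := by
  simp [pvW0]; omega

theorem pvSched_inv (M : List Int) (n : Nat) (h16 : 16 ≤ n) (h64 : n ≤ 64) :
    ((PySem.List.pyRange 16 n 1).foldl pvSchedStep (pvW0 M)).length = (pvW0 M).length ∧
    ∀ j < n, ((PySem.List.pyRange 16 n 1).foldl pvSchedStep (pvW0 M)).getD j 0 = pvWspec M j := by
  induction n, h16 using Nat.le_induction with
  | base =>
    rw [PySem.List.pyRange_one_eq_nil (by norm_num)]
    refine ⟨rfl, fun j hj => ?_⟩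
    rw [pvWspec]
    simp [hj]
  | succ n hn ih =>
    have ih := ih (by omega)
    set Wn := (PySem.List.pyRange 16 (n:Int) 1).foldl pvSchedStep (pvW0 M) with hWn
    have hcast : ((n+1 : Nat) : Int) = (n : Int) + 1 := by push_cast; ring
    rw [hcast, PySem.List.pyRange_one_succ_right (by exact_mod_cast hn), List.foldl_append]
    simp only [List.foldl_cons, List.foldl_nil]
    have hlen : 64 ≤ Wn.length := ih.1 ▸ pvW0_length M
    have hget : ∀ (k : Nat), k < n → PySem.List.pyGetD Wn ((n:Int) - (n - k : Nat)) 0 = pvWspec M k := by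
      intro k hk
      have : (n:Int) - ((n - k : Nat) : Int) = (k : Nat) := by omega
      rw [this, PySem.List.pyGetD_natCast]
      exact ih.2 k hk
    have hg : ∀ (i : Int) (k : Nat), i = (k:Int) → k < n → PySem.List.pyGetD Wn i 0 = pvWspec M k := by
      rintro i k rfl hk
      rw [PySem.List.pyGetD_natCast]
      exact ih.2 k hk
    have hv : pvSchedStep Wn (n : Int) = Wn.set n (pvWspec M n) := by
      unfold pvSchedStep
      rw [PySem.List.pySetD_natCast]
      rw [hg ((n:Int)-2) (n-2) (by omega) (by omega), hg ((n:Int)-7) (n-7) (by omega) (by omega),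
          hg ((n:Int)-15) (n-15) (by omega) (by omega), hg ((n:Int)-16) (n-16) (by omega) (by omega)]
      conv_rhs => rw [pvWspec]
      rw [dif_neg (by omega)]
    rw [hv]
    refine ⟨by simp [ih.1], fun j hj => ?_⟩
    by_cases hjn : j = n
    · subst hjn
      rw [List.getD_eq_getElem?_getD, List.getElem?_set_self (by omega)]
      rfl
    · rw [List.getD_eq_getElem?_getD, List.getElem?_set_ne (Ne.symm hjn), ← List.getD_eq_getElem?_getD]
      exact ih.2 j (by omega)
def pvWin (M : List Int) (n : Nat) : List Int :=
  [pvWspec M (n - 16), pvWspec M (n - 16 + 1), pvWspec M (n - 16 + 2), pvWspec M (n - 16 + 3),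
   pvWspec M (n - 16 + 4), pvWspec M (n - 16 + 5), pvWspec M (n - 16 + 6), pvWspec M (n - 16 + 7),
   pvWspec M (n - 16 + 8), pvWspec M (n - 16 + 9), pvWspec M (n - 16 + 10), pvWspec M (n - 16 + 11),
   pvWspec M (n - 16 + 12), pvWspec M (n - 16 + 13), pvWspec M (n - 16 + 14), pvWspec M (n - 16 + 15)]

theorem pvWspec_congr (M : List Int) {a b : Nat} (h : a = b) : pvWspec M a = pvWspec M b := by rw [h]

theorem pvWspec_lt16 (M : List Int) (j : Nat) (h : j < 16) : pvWspec M j = (pvW0 M).getD j 0 := by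
  rw [pvWspec]; simp [h]

theorem pvWin_zero (M : List Int) :
    PySem.List.slice (M ++ List.replicate 16 0) none (some 16) = pvWin M 0 := by
  rw [PySem.List.slice_to (M ++ List.replicate 16 0) (by norm_num)]
  have hpv : (pvWin M 0) = (List.range 16).map (fun k => (pvW0 M).getD k 0) := by
    simp only [pvWin, List.range_succ, List.map_cons, List.map_nil,
      List.range_zero, List.nil_append, List.cons_append, List.cons.injEq, and_true]
    and_intros <;> { apply pvWspec_lt16; norm_num }
  rw [hpv]
  apply List.ext_getElem
  · simp
  · intro k h1 h2
    simp only [List.getElem_take, List.getElem_map, List.getElem_range]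
    simp only [List.length_take, List.length_append, List.length_replicate] at h1
    have hk : k < 16 := by omega
    simp only [pvW0, List.getD_eq_getElem?_getD]
    by_cases hm : k < M.length
    · rw [List.getElem_append_left hm, List.getElem?_append_left hm, List.getElem?_eq_getElem hm]
      rfl
    · rw [List.getElem_append_right (by omega), List.getElem?_append_right (by omega),
         List.getElem?_replicate, if_pos (by omega), List.getElem_replicate]
      rfl
theorem pvRound_eq (M : List Int) (n : Nat) (hn : n < 64)
    (st : Int × Int × Int × Int × Int × Int × Int × Int × Int) :
    pvRoundB (pvWin M n, st) (n : Int) =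
      (pvWin M (n + 1), pvRoundA ((PySem.List.pyRange 16 64 1).foldl pvSchedStep (pvW0 M)) st (n : Int)) := by
  obtain ⟨a, b, c, d, e, f, g, h, profile⟩ := st
  have hW := (pvSched_inv M 64 (by norm_num) (by norm_num)).2 n hn
  simp only [Nat.cast_ofNat] at hW
  by_cases h16 : n < 16
  · -- round r = n < 16: window untouched, w = win[n] = Wspec n
    have hwin1 : pvWin M (n + 1) = pvWin M n := by
      unfold pvWin
      simp only [List.cons.injEq, and_true]
      and_intros <;> { apply pvWspec_congr; omega }
    have hw : PySem.List.pyGetD (pvWin M n) (n : Int) 0 = pvWspec M n := by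
      rw [PySem.List.pyGetD_natCast]
      interval_cases n <;> simp [pvWin]
    simp only [pvRoundB, pvRoundA, if_pos (show (n:Int) < 16 by exact_mod_cast h16), hw, hwin1,
      PySem.List.pyGetD_natCast, hW]
  · -- round r = n ≥ 16: slide the window, w = recurrence = Wspec n
    have hcond : ¬ ((n : Int) < 16) := by exact_mod_cast h16
    have hw : PySem.Int.band (pvSsig1 (PySem.List.pyGetD (pvWin M n) 14 0) + PySem.List.pyGetD (pvWin M n) 9 0 +
          pvSsig0 (PySem.List.pyGetD (pvWin M n) 1 0) + PySem.List.pyGetD (pvWin M n) 0 0) pvMASK32 = pvWspec M n := by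
      have h14 : PySem.List.pyGetD (pvWin M n) 14 0 = pvWspec M (n - 16 + 14) := by
        rw [PySem.List.pyGetD_ofNat' (pvWin M n) 14]; rfl
      have h9 : PySem.List.pyGetD (pvWin M n) 9 0 = pvWspec M (n - 16 + 9) := by
        rw [PySem.List.pyGetD_ofNat' (pvWin M n) 9]; rfl
      have h1 : PySem.List.pyGetD (pvWin M n) 1 0 = pvWspec M (n - 16 + 1) := by
        rw [PySem.List.pyGetD_ofNat' (pvWin M n) 1]; rfl
      have h0 : PySem.List.pyGetD (pvWin M n) 0 0 = pvWspec M (n - 16) := by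
        rw [PySem.List.pyGetD_ofNat' (pvWin M n) 0]; rfl
      rw [h14, h9, h1, h0, pvWspec_congr M (show n - 16 + 14 = n - 2 by omega),
         pvWspec_congr M (show n - 16 + 9 = n - 7 by omega),
         pvWspec_congr M (show n - 16 + 1 = n - 15 by omega)]
      conv_rhs => rw [pvWspec]
      rw [dif_neg (by omega)]
    have hslide : PySem.List.slice (pvWin M n) (some 1) none ++ [pvWspec M n] = pvWin M (n + 1) := by
      rw [PySem.List.slice_from_one]
      unfold pvWin
      simp only [List.tail_cons, List.cons_append, List.nil_append, List.cons.injEq, and_true]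
      and_intros <;> { apply pvWspec_congr; omega }
    simp only [pvRoundB, pvRoundA, if_neg hcond, hw, hslide, PySem.List.pyGetD_natCast, hW]
theorem pvFold_eq (M : List Int) (n : Nat) (hn : n ≤ 64) :
    (PySem.List.pyRange 0 (n : Int) 1).foldl pvRoundB
        (pvWin M 0, 0x6a09e667, 0xbb67ae85, 0x3c6ef372, 0xa54ff53a, 0x510e527f, 0x9b05688c, 0x1f83d9ab, 0x5be0cd19, 0) =
      (pvWin M n,
       (PySem.List.pyRange 0 (n : Int) 1).foldl (pvRoundA ((PySem.List.pyRange 16 64 1).foldl pvSchedStep (pvW0 M)))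
        (0x6a09e667, 0xbb67ae85, 0x3c6ef372, 0xa54ff53a, 0x510e527f, 0x9b05688c, 0x1f83d9ab, 0x5be0cd19, 0)) := by
  induction n with
  | zero => simp [PySem.List.pyRange_one_eq_nil]
  | succ n ih =>
    have hcast : ((n+1 : Nat) : Int) = (n : Int) + 1 := by push_cast; ring
    rw [hcast, PySem.List.pyRange_one_succ_right (by positivity), List.foldl_append,
       List.foldl_append, List.foldl_cons, List.foldl_nil, List.foldl_cons, List.foldl_nil,
       ih (by omega), pvRound_eq M n (by omega)]

-- ===== VERDICT (by name: the statement is the Claim_ definition above) =====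
theorem carry_profile_spec : Claim_equal_carry_profile := by
  intro M R _ hpre
  replace hpre : R ≤ 64 := hpre
  unfold Spec_carry_profile carry_profile carry_profile_alt
  dsimp only
  rw [pvWin_zero M]
  by_cases hR : R ≤ 0
  · rw [PySem.List.pyRange_one_eq_nil hR]
    rfl
  · rw [show R = ((R.toNat : Nat) : Int) by omega, pvFold_eq M R.toNat (by omega)]
    rfl
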